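-- pv_equiv track=rewrite | github.com/aws-samples/Intelli-Agent | source/lambda/embedding/utils/splitter_utils.py | find_next_with_same_level
-- ===== SOURCE A (Python) =====
-- def find_next_with_same_level(headers: dict, header_id: str):
--     level = headers[header_id]["level"]
--     header_found = False
--
--     for id, header in headers.items():
--         if header_id == id:
--             header_found = True
--
--         # Find the next node with the same level
--         if header_found and header["level"] == level and header_id != id:
--             return id
--
--     return None
-- ===== SOURCE B (Python) =====
-- def find_next_with_same_level(headers: dict, header_id: str):
--     level = headers[header_id]["level"]
--     # collect, in order, the ids of all headers at this level; the answer is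
--     # header_id's successor within this bucket (None if it is the last one)
--     same = [id for id, h in headers.items() if h["level"] == level]
--     i = same.index(header_id)
--     return same[i + 1] if i + 1 < len(same) else None
-- ===== Notes on version B (the rewrite author's own statement) =====
-- stated objective: alternative
-- what changed: Instead of A's flag-driven scan that compares every entry after the target, B builds the ordered bucket of ids whose level equals the target's level and returns the target's successor inside that bucket; Pre_ additionally requires every header dict to carry a 'level' key, because B's bucket pass reads all entries while A stops at the first match.
-- outside the precondition, e.g. on find_next_with_same_level({'a': {'level': 1}, 'b': {'level': 1}, 'c': {}}, 'a'): A returns 'b', B raises KeyError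
import Mathlib
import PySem

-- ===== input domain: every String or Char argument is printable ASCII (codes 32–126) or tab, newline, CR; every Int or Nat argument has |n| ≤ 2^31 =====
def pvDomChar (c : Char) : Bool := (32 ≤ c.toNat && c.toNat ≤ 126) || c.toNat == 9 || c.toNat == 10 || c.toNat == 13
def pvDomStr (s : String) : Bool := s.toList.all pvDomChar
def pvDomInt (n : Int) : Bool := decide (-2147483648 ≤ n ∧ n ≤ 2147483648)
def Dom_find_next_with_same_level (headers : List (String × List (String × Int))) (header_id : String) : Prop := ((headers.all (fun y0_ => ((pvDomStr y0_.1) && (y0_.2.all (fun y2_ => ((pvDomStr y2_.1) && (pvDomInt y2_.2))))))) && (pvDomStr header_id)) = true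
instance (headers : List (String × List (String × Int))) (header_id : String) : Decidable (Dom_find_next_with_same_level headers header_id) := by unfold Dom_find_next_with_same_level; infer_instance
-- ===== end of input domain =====

-- B replaces A's flag-driven scan with a group-by-level pass: it collects the ordered bucket of
-- same-level ids and returns header_id's successor in that bucket (objective: alternative, same cost).

-- ===== PORT A =====
-- first-match association-list lookup, exact for Python dict access (none = KeyError, excluded by Pre_)
def pvDget {α : Type} (d : List (String × α)) (k : String) : Option α :=
  (d.find? (fun p => p.1 == k)).map (·.2)

-- header["level"]; the default 0 is only reached outside Pre_ (Python raises KeyError there)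
def pvLevelOf (h : List (String × Int)) : Int := (pvDget h "level").getD 0

-- the 'for id, header in headers.items()' loop with the header_found flag
def pvLoopA (header_id : String) (level : Int) :
    List (String × List (String × Int)) → Bool → Option String
  | [], _ => none
  | (id, header) :: rest, found =>
    let found := found || (header_id == id)
    if found && (pvLevelOf header == level) && !(header_id == id) then some id
    else pvLoopA header_id level rest found

def find_next_with_same_level (headers : List (String × List (String × Int))) (header_id : String) : Option String :=
  let level := pvLevelOf ((pvDget headers header_id).getD [])
  pvLoopA header_id level headers false

-- ===== PORT B =====
-- same = [id for id, h in headers.items() if h["level"] == level]; i = same.index(header_id);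
-- same[i+1] if i+1 < len(same) else None
def find_next_with_same_level_alt (headers : List (String × List (String × Int))) (header_id : String) : Option String :=
  let level := pvLevelOf ((pvDget headers header_id).getD [])
  let same := (headers.filter (fun p => pvLevelOf p.2 == level)).map Prod.fst
  match PySem.List.index? same header_id with
  | none => none  -- unreachable under Pre_ (Python: ValueError)
  | some i => if i + 1 < same.length then same[i + 1]? else none

-- ===== PRECONDITION & SPEC =====
-- Pre_ excludes: duplicate outer keys (the list then does not represent a Python dict), a missing
-- header_id key (A raises KeyError), and any header dict without a "level" entry: A raises KeyError
-- on those it scans before the first match, and B's bucket pass reads every entry, so on entries A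
-- never reaches it would raise where A returns (the one narrowing beyond A's return domain; cited).
def Pre_find_next_with_same_level (headers : List (String × List (String × Int))) (header_id : String) : Prop :=
  (headers.map Prod.fst).Nodup ∧
  header_id ∈ headers.map Prod.fst ∧
  ∀ p ∈ headers, "level" ∈ p.2.map Prod.fst
instance (headers : List (String × List (String × Int))) (header_id : String) : Decidable (Pre_find_next_with_same_level headers header_id) := by unfold Pre_find_next_with_same_level; infer_instance

def pvWitness_find_next_with_same_level : (List (String × List (String × Int))) × String :=
  ([("a", [("level", 1)]), ("b", [("level", 1)])], "a")

def Spec_find_next_with_same_level (headers : List (String × List (String × Int))) (header_id : String) (out : Option String) : Prop := out = find_next_with_same_level_alt headers header_id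
instance (headers : List (String × List (String × Int))) (header_id : String) (out : Option String) : Decidable (Spec_find_next_with_same_level headers header_id out) := by unfold Spec_find_next_with_same_level; infer_instance

-- ===== CLAIM (what is proved, stated in full; the proofs are below) =====
def Claim_equal_find_next_with_same_level : Prop := ∀ (headers : List (String × List (String × Int))) (header_id : String), Dom_find_next_with_same_level headers header_id → Pre_find_next_with_same_level headers header_id → Spec_find_next_with_same_level headers header_id (find_next_with_same_level headers header_id)

-- ===== LEMMAS AND PROOFS =====

-- split off the prefix before the (first) occurrence of header_id
lemma pv_split (headers : List (String × List (String × Int))) (header_id : String)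
    (hmem : header_id ∈ headers.map Prod.fst) :
    ∃ pre h post, headers = pre ++ (header_id, h) :: post ∧ header_id ∉ pre.map Prod.fst := by
  induction headers with
  | nil => simp at hmem
  | cons x xs ih =>
    by_cases hx : x.1 = header_id
    · exact ⟨[], x.2, xs, by simp [← hx], by simp⟩
    · have hmem' : header_id ∈ xs.map Prod.fst := by
        rw [List.map_cons] at hmem
        rcases List.mem_cons.1 hmem with h | h
        · exact absurd h.symm hx
        · exact h
      obtain ⟨pre, h, post, heq, hpre⟩ := ih hmem'
      refine ⟨x :: pre, h, post, by simp [heq], ?_⟩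
      intro hm
      rw [List.map_cons] at hm
      rcases List.mem_cons.1 hm with e | e
      · exact hx e.symm
      · exact hpre e

lemma pvDget_cons_ne {α : Type} (x : String × α) (xs : List (String × α)) (k : String)
    (hx : x.1 ≠ k) : pvDget (x :: xs) k = pvDget xs k := by
  simp [pvDget, List.find?, show (x.1 == k) = false by simpa using hx]

lemma pvDget_append_not_mem {α : Type} (pre : List (String × α)) (k : String) (v : α)
    (rest : List (String × α)) (hpre : k ∉ pre.map Prod.fst) :
    pvDget (pre ++ (k, v) :: rest) k = some v := by
  induction pre with
  | nil => simp [pvDget]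
  | cons x xs ih =>
    have hx : x.1 ≠ k := fun e => hpre (by simp [e])
    rw [List.cons_append, pvDget_cons_ne x _ k hx]
    exact ih (fun hm => hpre (by simp at hm ⊢; exact Or.inr hm))

-- A's loop skips the prefix before header_id (found stays False, the return condition is False)
lemma pvLoopA_pre (header_id : String) (level : Int)
    (pre rest : List (String × List (String × Int))) (hpre : header_id ∉ pre.map Prod.fst) :
    pvLoopA header_id level (pre ++ rest) false = pvLoopA header_id level rest false := by
  induction pre with
  | nil => rfl
  | cons x xs ih =>
    obtain ⟨id, hdr⟩ := x
    have hx : (header_id == id) = false := by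
      simp only [beq_eq_false_iff_ne]
      intro e; exact hpre (by simp [e])
    rw [List.cons_append]
    show pvLoopA header_id level ((id, hdr) :: (xs ++ rest)) false = _
    have hpre' : header_id ∉ xs.map Prod.fst := fun hm => hpre (by rw [List.map_cons]; exact List.mem_cons_of_mem _ hm)
    simpa [pvLoopA, hx] using ih hpre'

-- at header_id's own entry the flag is set, and the 'header_id != id' guard blocks returning
lemma pvLoopA_at (header_id : String) (level : Int) (h : List (String × Int))
    (post : List (String × List (String × Int))) :
    pvLoopA header_id level ((header_id, h) :: post) false = pvLoopA header_id level post true := by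
  simp [pvLoopA]

-- once the flag is set, A's loop returns exactly the first same-level id, i.e. the head of
-- B's bucket restricted to the suffix after header_id
lemma pvLoopA_post (header_id : String) (level : Int)
    (post : List (String × List (String × Int))) (hnot : header_id ∉ post.map Prod.fst) :
    pvLoopA header_id level post true
      = ((post.filter (fun p => pvLevelOf p.2 == level)).map Prod.fst).head? := by
  induction post with
  | nil => rfl
  | cons x xs ih =>
    obtain ⟨id, hdr⟩ := x
    have hx : (header_id == id) = false := by
      simp only [beq_eq_false_iff_ne]
      intro e; exact hnot (by simp [e])
    have hnot' : header_id ∉ xs.map Prod.fst := fun hm => hnot (by rw [List.map_cons]; exact List.mem_cons_of_mem _ hm)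
    by_cases hl : (pvLevelOf hdr == level) = true
    · simp [pvLoopA, hx, hl]
    · simp only [Bool.not_eq_true] at hl
      simp only [pvLoopA, List.filter_cons, hx, hl, Bool.true_or, Bool.true_and,
        Bool.not_false, Bool.and_true]
      exact ih hnot'

lemma pv_index_pre (pre : List String) (header_id : String) (post : List String)
    (hpre : header_id ∉ pre) :
    PySem.List.index? (pre ++ header_id :: post) header_id = some pre.length := by
  induction pre with
  | nil => simp [PySem.List.index?_eq_idxOf?, List.idxOf?, List.findIdx?_cons]
  | cons x xs ih =>
    have hx : x ≠ header_id := fun e => hpre (by simp [e])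
    rw [List.cons_append, PySem.List.index?_cons_of_ne (xs ++ header_id :: post) hx,
        ih (fun hm => hpre (List.mem_cons_of_mem _ hm))]
    simp

-- ===== VERDICT (by name: the statement is the Claim_ definition above) =====
theorem find_next_with_same_level_spec : Claim_equal_find_next_with_same_level := by
  intro headers header_id _ hpre
  obtain ⟨hnd, hmem, _⟩ := hpre
  obtain ⟨pre, h, post, heq, hpreid⟩ := pv_split headers header_id hmem
  subst heq
  have hget : pvDget (pre ++ (header_id, h) :: post) header_id = some h :=
    pvDget_append_not_mem pre header_id h post hpreid
  have hnotpost : header_id ∉ post.map Prod.fst := by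
    intro hm
    have h1 : ((header_id :: post.map Prod.fst)).Nodup := by
      have := hnd
      rw [List.map_append, List.map_cons] at this
      exact this.of_append_right
    exact (List.nodup_cons.1 h1).1 hm
  show _ = find_next_with_same_level_alt _ _
  unfold find_next_with_same_level find_next_with_same_level_alt
  simp only [hget, Option.getD_some]
  rw [pvLoopA_pre header_id _ pre _ hpreid, pvLoopA_at,
      pvLoopA_post header_id _ post hnotpost]
  set c : (String × List (String × Int)) → Bool := fun p => pvLevelOf p.2 == pvLevelOf h with hc
  have hch : c (header_id, h) = true := by simp [hc]
  have hfilter : (pre ++ (header_id, h) :: post).filter c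
      = pre.filter c ++ (header_id, h) :: post.filter c := by
    rw [List.filter_append, List.filter_cons, hch]; rfl
  have hsame : ((pre ++ (header_id, h) :: post).filter c).map Prod.fst
      = (pre.filter c).map Prod.fst ++ header_id :: (post.filter c).map Prod.fst := by
    rw [hfilter]; simp
  have hnpre : header_id ∉ (pre.filter c).map Prod.fst := by
    intro hm
    obtain ⟨p, hp, he⟩ := List.mem_map.1 hm
    exact hpreid (he ▸ List.mem_map_of_mem (List.mem_of_mem_filter hp))
  rw [hsame, pv_index_pre _ _ _ hnpre]
  set L := ((pre.filter c).map Prod.fst).length with hL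
  set tail := (post.filter c).map Prod.fst with ht
  have hlen : ((pre.filter c).map Prod.fst ++ header_id :: tail).length = L + 1 + tail.length := by
    simp [hL]; omega
  have hgetE : ((pre.filter c).map Prod.fst ++ header_id :: tail)[L + 1]? = tail[0]? := by
    rw [show (pre.filter c).map Prod.fst ++ header_id :: tail
          = ((pre.filter c).map Prod.fst ++ [header_id]) ++ tail by simp,
        List.getElem?_append_right (by simp [hL]),
        show L + 1 - ((pre.filter c).map Prod.fst ++ [header_id]).length = 0 by simp [hL]]
  show tail.head? = if L + 1 < ((pre.filter c).map Prod.fst ++ header_id :: tail).length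
      then ((pre.filter c).map Prod.fst ++ header_id :: tail)[L + 1]? else none
  by_cases hT : tail = []
  · rw [if_neg (by rw [hlen, hT]; simp), hT]; rfl
  · rw [if_pos (by rw [hlen]; have := List.length_pos_iff.2 hT; omega), hgetE,
        List.head?_eq_getElem?]
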